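-- pv_equiv track=rewrite | github.com/aesupakorn/pythondivine | barcode_EAN13.py | patterns_of
-- ===== SOURCE A (Python) =====
-- L_codes = ['0001101', '0011001', '0010011', '0111101', '0100011', \
--  '0110001', '0101111', '0111011', '0110111', '0001011']
--
-- G_codes = ['0100111', '0110011', '0011011', '0100001', '0011101', \
--  '0111001', '0000101', '0010001', '0001001', '0010111']
--
-- R_codes = ['1110010', '1100110', '1101100', '1000010', '1011100', \
--  '1001110', '1010000', '1000100', '1001000', '1110100']
--
-- def patterns_of( codes ):
--     count = 0
--     result2=''
--     while count != len(codes):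
--         count1=0
--
--         if codes[count] == '0':
--
--             lstcode=''
--             for i in range(count,count+7):
--                 lstcode+=codes[i]
--                 if(codes[i]=='1'):
--                     count1+=1
--
--             if(count1 % 2 == 0):
--
--                 for j2 in range(0,len(G_codes)):
--                     if lstcode == G_codes[j2]:
--                         result2+='G'
--                         break
--                     else:
--                         result2+=''
--             else :
--                 for j2 in range(0,len(L_codes)):
--                     if lstcode == L_codes[j2]:
--                         result2+='L'
--                         break
--                     else:
--                         result2+=''
--         else:
--             lstcode2=''
--             for i in range(count,count+7):
--                 lstcode2+=codes[i]
--             for j2 in range(0,len(R_codes)):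
--                 if lstcode2 == R_codes[j2]:
--                     result2+='R'
--                     break
--                 else:
--                         result2+=''
--         count+=7
--     if(len(result2) != count/7):
--         return ''
--     else:
--         return result2
-- ===== SOURCE B (Python) =====
-- L_codes = ['0001101', '0011001', '0010011', '0111101', '0100011', \
--  '0110001', '0101111', '0111011', '0110111', '0001011']
--
-- G_codes = ['0100111', '0110011', '0011011', '0100001', '0011101', \
--  '0111001', '0000101', '0010001', '0001001', '0010111']
--
-- R_codes = ['1110010', '1100110', '1101100', '1000010', '1011100', \
--  '1001110', '1010000', '1000100', '1001000', '1110100']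
--
-- # the 30 patterns are pairwise distinct, so one lookup table replaces the
-- # first-bit branch, the parity count and the three linear table scans
-- CODE_TO_LETTER = {}
-- for _c in L_codes:
--     CODE_TO_LETTER[_c] = 'L'
-- for _c in G_codes:
--     CODE_TO_LETTER[_c] = 'G'
-- for _c in R_codes:
--     CODE_TO_LETTER[_c] = 'R'
--
-- def patterns_of(codes):
--     res = ''
--     for i in range(0, len(codes), 7):
--         chunk = ''.join(codes[i + j] for j in range(7))
--         res += CODE_TO_LETTER.get(chunk, '')
--     return res if len(res) * 7 == len(codes) else ''
-- ===== Notes on version B (the rewrite author's own statement) =====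
-- stated objective: simpler
-- what changed: One precomputed pattern-to-letter dict (the 30 codes are disjoint) looked up per 7-char chunk replaces A's first-bit branch, per-chunk parity counting pass and three per-table linear scans; the while/count loop becomes a comprehension-style for over chunk starts.
import Mathlib
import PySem

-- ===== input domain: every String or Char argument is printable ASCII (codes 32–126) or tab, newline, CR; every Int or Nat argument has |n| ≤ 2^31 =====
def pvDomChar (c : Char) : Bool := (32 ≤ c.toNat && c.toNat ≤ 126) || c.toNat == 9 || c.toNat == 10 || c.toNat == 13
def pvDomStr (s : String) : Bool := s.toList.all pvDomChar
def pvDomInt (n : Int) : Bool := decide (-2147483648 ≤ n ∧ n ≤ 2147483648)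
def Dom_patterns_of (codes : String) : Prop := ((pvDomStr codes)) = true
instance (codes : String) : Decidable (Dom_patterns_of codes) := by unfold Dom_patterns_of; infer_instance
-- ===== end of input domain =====

-- B replaces A's first-bit branch, parity count and three per-table linear scans by one
-- precomputed pattern→letter table looked up per 7-char chunk (objective: simpler).


-- ===== PORT A =====
def pvL : List (List Char) := ["0001101", "0011001", "0010011", "0111101", "0100011",
  "0110001", "0101111", "0111011", "0110111", "0001011"].map String.toList

def pvG : List (List Char) := ["0100111", "0110011", "0011011", "0100001", "0011101",
  "0111001", "0000101", "0010001", "0001001", "0010111"].map String.toList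

def pvR : List (List Char) := ["1110010", "1100110", "1101100", "1000010", "1011100",
  "1001110", "1010000", "1000100", "1001000", "1110100"].map String.toList

-- A's 'for j2 in range(0, len(tbl)): if lst == tbl[j2]: result2 += letter; break; else: result2 += "" '
def pvScan (tbl : List (List Char)) (lst : List Char) (letter : Char) : List Char :=
  match tbl with
  | [] => []
  | t :: ts => if lst = t then [letter] else pvScan ts lst letter

-- A's while-loop; the fuel only makes the recursion total (count steps by 7, the loop exits when
-- count = len); codes[i] is in range on every admitted input (Pre_), so getD's default is never read.
def pvLoopA (cs : List Char) (fuel count : Nat) (result2 : List Char) : List Char × Nat :=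
  if count = cs.length then (result2, count)
  else match fuel with
  | 0 => (result2, count)
  | f + 1 =>
    if cs.getD count ' ' = '0' then
      -- lstcode built and count1 incremented in the same for-loop over range(count, count+7)
      let p := (List.range' count 7).foldl
        (fun (p : List Char × Nat) i =>
          let c := cs.getD i ' '
          (p.1 ++ [c], if c = '1' then p.2 + 1 else p.2)) ([], 0)
      let result2 := if p.2 % 2 = 0 then result2 ++ pvScan pvG p.1 'G'
                     else result2 ++ pvScan pvL p.1 'L'
      pvLoopA cs f (count + 7) result2
    else
      let lstcode2 := (List.range' count 7).foldl (fun acc i => acc ++ [cs.getD i ' ']) []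
      pvLoopA cs f (count + 7) (result2 ++ pvScan pvR lstcode2 'R')

def patterns_of (codes : String) : String :=
  let cs := codes.toList
  let r := pvLoopA cs (cs.length + 1) 0 []
  -- 'len(result2) != count/7' with count always a multiple of 7 is 'len(result2)*7 != count'
  if r.1.length * 7 ≠ r.2 then "" else String.ofList r.1

-- ===== PORT B =====
-- CODE_TO_LETTER, built once by the three module-level for-loops
def pvDict : PySem.Dict (List Char) (List Char) :=
  let d := pvL.foldl (fun d c => d.insert c ['L']) PySem.Dict.empty
  let d := pvG.foldl (fun d c => d.insert c ['G']) d
  pvR.foldl (fun d c => d.insert c ['R']) d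

-- B's loop body: res += CODE_TO_LETTER.get(''.join(codes[i+j] for j in range(7)), '');
-- codes[i+j] is pyGet? (none = IndexError); in range on every admitted input (Pre_), so
-- getD's default is never read there.
def pvChunkB (cs : List Char) (res : List Char) (i : Int) : List Char :=
  res ++ pvDict.getD ((List.range 7).map (fun (j : Nat) => (PySem.List.pyGet? cs (i + (j : Int))).getD ' ')) []

def patterns_of_alt (codes : String) : String :=
  let cs := codes.toList
  let res := (PySem.List.pyRange 0 (cs.length : Int) 7).foldl (pvChunkB cs) []
  if res.length * 7 = cs.length then String.ofList res else ""

-- ===== PRECONDITION & SPEC =====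
-- Pre_ excludes exactly the inputs on which both Pythons raise IndexError (an index past the
-- end): lengths not a multiple of 7.
def Pre_patterns_of (codes : String) : Prop := codes.toList.length % 7 = 0
instance (codes : String) : Decidable (Pre_patterns_of codes) := by unfold Pre_patterns_of; infer_instance
def pvWitness_patterns_of : String := "0001101"

def Spec_patterns_of (codes : String) (out : String) : Prop := out = patterns_of_alt codes
instance (codes : String) (out : String) : Decidable (Spec_patterns_of codes out) := by unfold Spec_patterns_of; infer_instance

-- ===== CLAIM (what is proved, stated in full; the proofs are below) =====
def Claim_equal_patterns_of : Prop := ∀ (codes : String), Dom_patterns_of codes → Pre_patterns_of codes → Spec_patterns_of codes (patterns_of codes)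

-- ===== LEMMAS AND PROOFS =====

-- A's table scan is a membership test
lemma pvScan_eq (tbl : List (List Char)) (lst : List Char) (letter : Char) :
    pvScan tbl lst letter = if lst ∈ tbl then [letter] else [] := by
  induction tbl with
  | nil => simp [pvScan]
  | cons t ts ih => by_cases h : lst = t <;> simp [pvScan, h, ih]

-- B's table lookup, characterised over the three source tables
lemma pvDict_getD (s : List Char) :
    pvDict.getD s [] =
      (if s ∈ pvL then ['L'] else if s ∈ pvG then ['G'] else if s ∈ pvR then ['R'] else []) := by
  by_cases hL : s ∈ pvL
  · fin_cases hL <;> decide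
  · by_cases hG : s ∈ pvG
    · fin_cases hG <;> decide
    · by_cases hR : s ∈ pvR
      · fin_cases hR <;> decide
      · simp only [hL, hG, hR, if_false]
        apply PySem.Dict.getD_of_not_contains
        have hk : pvDict.keys = pvL ++ pvG ++ pvR := by decide
        rw [PySem.Dict.contains_eq_decide_mem_keys, hk]
        simp [hL, hG, hR]

-- the letter appended by A's branchy step equals B's table lookup, for any chunk
lemma chunk_letter (s : List Char) :
    (if s.getD 0 ' ' = '0' then
       (if s.count '1' % 2 = 0 then pvScan pvG s 'G' else pvScan pvL s 'L')
     else pvScan pvR s 'R') = pvDict.getD s [] := by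
  rw [pvDict_getD, pvScan_eq, pvScan_eq, pvScan_eq]
  by_cases hL : s ∈ pvL
  · fin_cases hL <;> decide
  · by_cases hG : s ∈ pvG
    · fin_cases hG <;> decide
    · by_cases hR : s ∈ pvR
      · fin_cases hR <;> decide
      · simp [hL, hG, hR]

-- A's chunk-building for-loop collects the indexed characters and counts the '1's
lemma foldA_map (cs : List Char) (idxs : List Nat) (acc : List Char × Nat) :
    idxs.foldl (fun (p : List Char × Nat) i =>
        let c := cs.getD i ' '
        (p.1 ++ [c], if c = '1' then p.2 + 1 else p.2)) acc
      = (acc.1 ++ idxs.map (cs.getD · ' '),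
         acc.2 + (idxs.map (cs.getD · ' ')).count '1') := by
  induction idxs generalizing acc with
  | nil => simp
  | cons i is ih =>
    simp only [List.foldl_cons, List.map_cons, ih, List.count_cons]
    refine Prod.ext (by simp) ?_
    simp only [beq_iff_eq]
    split_ifs with h <;> omega

lemma pyRange7_nil (a b : Int) (h : ¬ a < b) : PySem.List.pyRange a b 7 = [] := by
  rw [PySem.List.pyRange_of_pos _ _ (by norm_num), if_neg h]
  simp

lemma pyRange7_cons (a b : Int) (h : a < b) :
    PySem.List.pyRange a b 7 = a :: PySem.List.pyRange (a + 7) b 7 := by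
  rw [PySem.List.pyRange_of_pos _ _ (by norm_num), PySem.List.pyRange_of_pos _ _ (by norm_num)]
  by_cases h2 : a + 7 < b
  · rw [if_pos h, if_pos h2]
    have hn : ((b - a + 7 - 1) / 7).toNat = ((b - (a + 7) + 7 - 1) / 7).toNat + 1 := by omega
    rw [hn, List.range_succ_eq_map]
    simp [List.map_map]
    intro k _
    ring
  · rw [if_pos h, if_neg h2]
    have hn : ((b - a + 7 - 1) / 7).toNat = 1 := by omega
    rw [hn]
    simp

-- B's chunk at a decomposed offset
lemma pvChunkB_eq (cs : List Char) (count : Nat) (c0 c1 c2 c3 c4 c5 c6 : Char) (rest : List Char)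
    (hx : cs.drop count = c0::c1::c2::c3::c4::c5::c6::rest) (res : List Char) :
    pvChunkB cs res (count : Int) = res ++ pvDict.getD [c0,c1,c2,c3,c4,c5,c6] [] := by
  have hgi : ∀ i : Nat, cs.getD (count + i) ' ' = (c0::c1::c2::c3::c4::c5::c6::rest).getD i ' ' := by
    intro i
    rw [← hx]
    simp [List.getD, List.getElem?_drop]
  have hc : ∀ j : Nat, (PySem.List.pyGet? cs ((count : Int) + (j : Int))).getD ' ' = cs.getD (count + j) ' ' := by
    intro j
    have h1 : (count : Int) + (j : Int) = ((count + j : Nat) : Int) := by push_cast; ring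
    rw [h1, PySem.List.pyGet?_natCast]
    simp [List.getD]
  unfold pvChunkB
  congr 2
  rw [show (fun j : Nat => (PySem.List.pyGet? cs ((count:Int) + (j : Int))).getD ' ')
        = (fun j : Nat => cs.getD (count + j) ' ') from funext hc]
  show List.map _ [0,1,2,3,4,5,6] = _
  simp only [List.map_cons, List.map_nil]
  rw [hgi 0, hgi 1, hgi 2, hgi 3, hgi 4, hgi 5, hgi 6]
  simp

-- A's while-loop over the remaining 7·k characters is B's fold over the remaining chunk starts
lemma loop_eq : ∀ (k : Nat) (cs : List Char) (count : Nat) (res : List Char) (fuel : Nat),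
    cs.length = count + 7 * k → k ≤ fuel →
    pvLoopA cs fuel count res
      = ((PySem.List.pyRange (count : Int) (cs.length : Int) 7).foldl (pvChunkB cs) res, cs.length) := by
  intro k
  induction k with
  | zero =>
    intro cs count res fuel h _
    rw [show count = cs.length by omega, pyRange7_nil _ _ (by omega)]
    rw [pvLoopA.eq_def]
    simp
  | succ k ih =>
    intro cs count res fuel h hf
    have hne : ¬ count = cs.length := by omega
    rcases fuel with _ | f
    · omega
    · have hdl : (cs.drop count).length = 7 * (k + 1) := by
        simp; omega
      rcases hx : cs.drop count with _ | ⟨c0, _ | ⟨c1, _ | ⟨c2, _ | ⟨c3, _ | ⟨c4, _ | ⟨c5, _ | ⟨c6, rest⟩⟩⟩⟩⟩⟩⟩ <;>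
          rw [hx] at hdl <;> simp at hdl <;> try omega
      case _ =>
        have hgi : ∀ i : Nat, cs.getD (count + i) ' ' = (c0::c1::c2::c3::c4::c5::c6::rest).getD i ' ' := by
          intro i
          rw [← hx]
          simp [List.getD, List.getElem?_drop]
        have hmap : (List.range' count 7).map (fun i => cs.getD i ' ') = [c0,c1,c2,c3,c4,c5,c6] := by
          show [cs.getD count ' ', cs.getD (count+1) ' ', cs.getD (count+2) ' ', cs.getD (count+3) ' ',
                cs.getD (count+4) ' ', cs.getD (count+5) ' ', cs.getD (count+6) ' '] = _
          rw [show count = count + 0 from rfl, hgi 0, hgi 1, hgi 2, hgi 3, hgi 4, hgi 5, hgi 6]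
          simp
        have hrange : PySem.List.pyRange (count : Int) (cs.length : Int) 7
            = (count : Int) :: PySem.List.pyRange ((count + 7 : Nat) : Int) (cs.length : Int) 7 := by
          rw [pyRange7_cons _ _ (by omega)]
          norm_num
        have ihh := ih cs (count + 7) (res ++ pvDict.getD [c0,c1,c2,c3,c4,c5,c6] []) f (by omega) (by omega)
        have hstep : pvLoopA cs (f + 1) count res =
            pvLoopA cs f (count + 7) (res ++ pvDict.getD [c0,c1,c2,c3,c4,c5,c6] []) := by
          rw [pvLoopA.eq_def]
          simp only [hne, if_false]
          rw [foldA_map, PySem.List.foldl_append_singleton_eq_map (fun i => cs.getD i ' ')]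
          simp only [hmap, List.nil_append, Nat.zero_add]
          rw [show cs.getD count ' ' = [c0,c1,c2,c3,c4,c5,c6].getD 0 ' ' from by
                rw [show count = count + 0 from rfl, hgi 0]; rfl]
          rw [← chunk_letter [c0,c1,c2,c3,c4,c5,c6]]
          split_ifs <;> rfl
        rw [hstep, ihh, hrange, List.foldl_cons, pvChunkB_eq cs count c0 c1 c2 c3 c4 c5 c6 rest hx res]

-- ===== VERDICT (by name: the statement is the Claim_ definition above) =====
theorem patterns_of_spec : Claim_equal_patterns_of := by
  intro codes _ hpre
  have hp : codes.toList.length % 7 = 0 := hpre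
  obtain ⟨k, hk⟩ : ∃ k, codes.toList.length = 0 + 7 * k :=
    ⟨codes.toList.length / 7, by omega⟩
  have h1 := loop_eq k codes.toList 0 [] (codes.toList.length + 1) hk (by omega)
  simp only [Nat.cast_zero] at h1
  show patterns_of codes = patterns_of_alt codes
  simp only [patterns_of, patterns_of_alt, h1]
  split_ifs with hA hB
  · rfl
  · rfl
  · exact absurd (not_not.mp hA) hB
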